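-- pv_equiv track=rewrite | github.com/josephgec/recursive-self-improvement | rlm/src/recursion/partitioner.py | line_based
-- ===== SOURCE A (Python) =====
-- from typing import List
--
-- def line_based(text: str, lines_per_chunk: int = 100) -> List[str]:
--     """Split text by line count."""
--     lines = text.split("\n")
--     chunks: List[str] = []
--     for i in range(0, len(lines), lines_per_chunk):
--         chunk = "\n".join(lines[i: i + lines_per_chunk])
--         if chunk:
--             chunks.append(chunk)
--     return chunks if chunks else [text]
-- ===== SOURCE B (Python) =====
-- def line_based(text: str, lines_per_chunk: int = 100):
--     """Split text by line count: single buffered pass instead of index slicing."""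
--     chunks = []
--     buffer = []
--     for line in text.split("\n"):
--         buffer.append(line)
--         if len(buffer) == lines_per_chunk:
--             chunk = "\n".join(buffer)
--             if chunk:
--                 chunks.append(chunk)
--             buffer = []
--     chunk = "\n".join(buffer)
--     if chunk:
--         chunks.append(chunk)
--     return chunks if chunks else [text]
-- ===== Notes on version B (the rewrite author's own statement) =====
-- stated objective: alternative
-- what changed: Replaces A's index arithmetic (range(0, len(lines), N) with slicing lines[i:i+N]) by a single element-wise pass that accumulates lines in a buffer and flushes it each time it reaches N lines, with a final flush after the loop.
import Mathlib
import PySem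

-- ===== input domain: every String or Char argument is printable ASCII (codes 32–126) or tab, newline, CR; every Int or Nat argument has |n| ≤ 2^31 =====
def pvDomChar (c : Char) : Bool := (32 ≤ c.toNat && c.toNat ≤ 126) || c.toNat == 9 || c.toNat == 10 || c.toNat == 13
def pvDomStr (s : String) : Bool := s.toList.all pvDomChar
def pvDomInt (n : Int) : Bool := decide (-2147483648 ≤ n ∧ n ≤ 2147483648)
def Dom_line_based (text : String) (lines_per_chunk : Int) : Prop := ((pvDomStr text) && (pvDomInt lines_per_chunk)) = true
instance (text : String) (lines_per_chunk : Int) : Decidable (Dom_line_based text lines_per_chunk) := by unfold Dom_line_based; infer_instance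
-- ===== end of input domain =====

-- B replaces A's index/slice loop over range(0, len(lines), N) by a single buffered
-- element-wise pass over the lines (objective: alternative decomposition, same cost).

-- ===== PORT A =====
-- A: lines = text.split("\n"); for i in range(0, len(lines), N): chunk = "\n".join(lines[i:i+N]);
--    if chunk: chunks.append(chunk); return chunks if chunks else [text]
-- (strings are handled as List Char via PySem.Chars; converted back at the return)
def line_based (text : String) (lines_per_chunk : Int) : List String :=
  let lines : List (List Char) := PySem.Chars.splitOn text.toList ['\n']
  let chunks : List (List Char) :=
    (PySem.List.pyRange 0 (lines.length : Int) lines_per_chunk).foldl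
      (fun acc i =>
        let chunk := PySem.Chars.join ['\n']
          (PySem.List.slice lines (some i) (some (i + lines_per_chunk)))
        if chunk ≠ [] then acc ++ [chunk] else acc)
      []
  if chunks ≠ [] then chunks.map (fun c => String.ofList c) else [text]

-- ===== PORT B =====
-- B: one pass, buffer + flush when the buffer reaches lines_per_chunk, final flush after the loop
def line_based_alt (text : String) (lines_per_chunk : Int) : List String :=
  let lines : List (List Char) := PySem.Chars.splitOn text.toList ['\n']
  let st : List (List Char) × List (List Char) :=
    lines.foldl
      (fun st line =>
        let buf := st.2 ++ [line]
        if (buf.length : Int) = lines_per_chunk then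
          let chunk := PySem.Chars.join ['\n'] buf
          (if chunk ≠ [] then st.1 ++ [chunk] else st.1, [])
        else (st.1, buf))
      ([], [])
  let finalChunk := PySem.Chars.join ['\n'] st.2
  let chunks := if finalChunk ≠ [] then st.1 ++ [finalChunk] else st.1
  if chunks ≠ [] then chunks.map (fun c => String.ofList c) else [text]

-- ===== PRECONDITION & SPEC =====
-- Pre_ excludes exactly lines_per_chunk = 0, where A's range(0, len, 0) raises ValueError.
def Pre_line_based (text : String) (lines_per_chunk : Int) : Prop := lines_per_chunk ≠ 0
instance (text : String) (lines_per_chunk : Int) : Decidable (Pre_line_based text lines_per_chunk) := by unfold Pre_line_based; infer_instance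
def pvWitness_line_based : String × Int := ("alpha\nbeta\ngamma", 2)

def Spec_line_based (text : String) (lines_per_chunk : Int) (out : List String) : Prop := out = line_based_alt text lines_per_chunk
instance (text : String) (lines_per_chunk : Int) (out : List String) : Decidable (Spec_line_based text lines_per_chunk out) := by unfold Spec_line_based; infer_instance

-- ===== CLAIM (what is proved, stated in full; the proofs are below) =====
def Claim_equal_line_based : Prop := ∀ (text : String) (lines_per_chunk : Int), Dom_line_based text lines_per_chunk → Pre_line_based text lines_per_chunk → Spec_line_based text lines_per_chunk (line_based text lines_per_chunk)

-- ===== LEMMAS AND PROOFS =====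

theorem pyRange_pos_cons (a b n : Int) (hn : 0 < n) (hab : a < b) :
    PySem.List.pyRange a b n = a :: PySem.List.pyRange (a + n) b n := by
  rw [PySem.List.pyRange_of_pos _ _ hn, PySem.List.pyRange_of_pos _ _ hn]
  have h1 : (if a < b then ((b - a + n - 1) / n).toNat else 0)
      = (if a + n < b then ((b - (a + n) + n - 1) / n).toNat else 0) + 1 := by
    rw [if_pos hab]
    by_cases h : a + n < b
    · rw [if_pos h]
      have e : b - a + n - 1 = (b - (a + n) + n - 1) + 1 * n := by ring
      rw [e, Int.add_mul_ediv_right _ _ (by omega)]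
      have hq : 0 ≤ (b - (a + n) + n - 1) / n := Int.ediv_nonneg (by omega) (by omega)
      omega
    · rw [if_neg h]
      have hd : (b - a + n - 1) / n = 1 := by
        have h3 : (b - a + n - 1) / n < 2 := by rw [Int.ediv_lt_iff_lt_mul hn]; omega
        have h4 : 1 ≤ (b - a + n - 1) / n := by rw [Int.le_ediv_iff_mul_le hn]; omega
        omega
      omega
  rw [h1, List.range_succ_eq_map, List.map_cons, List.map_map]
  refine congrArg₂ _ (by simp) ?_
  apply List.map_congr_left
  intro k _
  simp [Function.comp]
  ring

theorem pyRange_pos_shift (b n : Int) (hn : 0 < n) :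
    PySem.List.pyRange n b n = (PySem.List.pyRange 0 (b - n) n).map (· + n) := by
  rw [PySem.List.pyRange_of_pos _ _ hn, PySem.List.pyRange_of_pos _ _ hn, List.map_map]
  have hc : (if n < b then ((b - n + n - 1) / n).toNat else 0)
      = (if 0 < b - n then ((b - n - 0 + n - 1) / n).toNat else 0) := by
    by_cases h : n < b
    · rw [if_pos h, if_pos (by omega)]; ring_nf
    · rw [if_neg h, if_neg (by omega)]
  rw [hc]
  apply List.map_congr_left
  intro k _
  simp [Function.comp]
  ring

theorem pyRange_neg_nil (a b n : Int) (hn : n < 0) (hab : a ≤ b) :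
    PySem.List.pyRange a b n = [] := by
  simp only [PySem.List.pyRange]
  rw [if_neg (by omega)]
  simp only [if_neg (by omega : ¬ 0 < n), if_neg (by omega : ¬ b < a)]
  simp

def chunksRec (m : Nat) : List (List Char) → List (List Char)
  | [] => []
  | l :: rest =>
    let c := PySem.Chars.join ['\n'] (l :: rest.take m)
    (if c ≠ [] then [c] else []) ++ chunksRec m (rest.drop m)
termination_by ls => ls.length
decreasing_by simp

theorem aloop_eq (m : Nat) (n : Int) (hn : (n : Int) = (m : Int) + 1) :
    ∀ (ls : List (List Char)) (acc : List (List Char)),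
    (PySem.List.pyRange 0 (ls.length : Int) n).foldl
      (fun acc i =>
        let chunk := PySem.Chars.join ['\n'] (PySem.List.slice ls (some i) (some (i + n)))
        if chunk ≠ [] then acc ++ [chunk] else acc) acc
    = acc ++ chunksRec m ls := by
  have hn0 : 0 < n := by omega
  intro ls
  induction hls : ls.length using Nat.strong_induction_on generalizing ls with
  | _ L IH =>
  intro acc
  cases ls with
  | nil =>
    subst hls
    rw [PySem.List.pyRange_of_pos _ _ hn0]
    simp [chunksRec]
  | cons l rest =>
    subst hls
    have hlen : (0 : Int) < ((l :: rest).length : Int) := by simp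
    rw [pyRange_pos_cons _ _ _ hn0 hlen, List.foldl_cons]
    rw [zero_add, pyRange_pos_shift _ _ hn0, List.foldl_map]
    -- rewrite remaining fold bodies to talk about the dropped list
    have hbody : ∀ acc', (PySem.List.pyRange 0 (((l :: rest).length : Int) - n) n).foldl
        (fun acc i => (fun acc i =>
          let chunk := PySem.Chars.join ['\n'] (PySem.List.slice (l :: rest) (some i) (some (i + n)))
          if chunk ≠ [] then acc ++ [chunk] else acc) acc (i + n)) acc'
        = (PySem.List.pyRange 0 (((l :: rest).drop n.toNat).length : Int) n).foldl
        (fun acc i =>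
          let chunk := PySem.Chars.join ['\n'] (PySem.List.slice ((l :: rest).drop n.toNat) (some i) (some (i + n)))
          if chunk ≠ [] then acc ++ [chunk] else acc) acc' := by
      intro acc'
      have hlen2 : (((l :: rest).drop n.toNat).length : Int) = max (((l :: rest).length : Int) - n) 0 := by
        simp [List.length_drop]
        omega
      by_cases hc : ((l :: rest).length : Int) - n ≤ 0
      · rw [PySem.List.pyRange_of_pos _ _ hn0, PySem.List.pyRange_of_pos _ _ hn0]
        rw [if_neg (by omega), if_neg (by omega)]
        simp
      · have : (((l :: rest).drop n.toNat).length : Int) = ((l :: rest).length : Int) - n := by omega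
        rw [this]
        apply PySem.List.foldl_congr_mem
        intro acc'' i hi
        have hi0 : 0 ≤ i := ((PySem.List.mem_pyRange_iff_of_pos hn0 i).mp hi).1
        have hshift : PySem.List.slice (l :: rest) (some (i + n)) (some (i + n + n))
            = PySem.List.slice ((l :: rest).drop n.toNat) (some i) (some (i + n)) := by
          rw [PySem.List.slice_toNat _ (by omega) (by omega),
              PySem.List.slice_toNat _ (by omega) (by omega)]
          have e1 : (i + n + n).toNat - (i + n).toNat = n.toNat := by omega
          have e2 : (i + n).toNat - i.toNat = n.toNat := by omega
          rw [e1, e2, List.drop_drop]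
          have e3 : n.toNat + i.toNat = (i + n).toNat := by omega
          rw [e3]
        simp only [hshift]
    rw [hbody, IH ((l :: rest).drop n.toNat).length (by simp; omega) _ rfl]
    -- now close with chunksRec equation
    rw [chunksRec]
    have hslice : PySem.List.slice (l :: rest) (some 0) (some n) = l :: rest.take m := by
      rw [PySem.List.slice_toNat _ (le_refl 0) (by omega)]
      have : n.toNat = m + 1 := by omega
      simp [this]
    have hdr : (l :: rest).drop n.toNat = rest.drop m := by
      have : n.toNat = m + 1 := by omega
      rw [this, List.drop_succ_cons]
    rw [hslice, hdr]
    by_cases hch : PySem.Chars.join ['\n'] (l :: rest.take m) ≠ []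
    · rw [if_pos hch, if_pos hch]; simp
    · rw [if_neg hch, if_neg hch]; simp

theorem bloop_eq (m : Nat) (n : Int) (hn : (n : Int) = (m : Int) + 1) :
    ∀ (ls : List (List Char)) (acc buf : List (List Char)), buf.length ≤ m →
    (let st := ls.foldl
        (fun st line =>
          let b := st.2 ++ [line]
          if (b.length : Int) = n then
            let chunk := PySem.Chars.join ['\n'] b
            (if chunk ≠ [] then st.1 ++ [chunk] else st.1, [])
          else (st.1, b)) (acc, buf)
     let fc := PySem.Chars.join ['\n'] st.2
     if fc ≠ [] then st.1 ++ [fc] else st.1)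
    = acc ++ chunksRec m (buf ++ ls) := by
  intro ls
  induction ls with
  | nil =>
    intro acc buf hbuf
    simp only [List.foldl_nil, List.append_nil]
    cases buf with
    | nil => simp [chunksRec, PySem.Chars.join_nil]
    | cons x t =>
      rw [chunksRec]
      have htk : List.take m t = t := List.take_of_length_le (by simpa using Nat.le_of_succ_le hbuf)
      have hdr : List.drop m t = [] := List.drop_eq_nil_of_le (by simpa using Nat.le_of_succ_le hbuf)
      rw [htk, hdr, chunksRec]
      by_cases hch : PySem.Chars.join ['\n'] (x :: t) ≠ []
      · rw [if_pos hch, if_pos hch]; simp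
      · rw [if_neg hch, if_neg hch]; simp
  | cons l rest ih =>
    intro acc buf hbuf
    simp only [List.foldl_cons]
    by_cases hfull : ((buf ++ [l]).length : Int) = n
    · rw [if_pos hfull]
      have hblen : buf.length = m := by
        have h := hfull
        simp [List.length_append] at h
        omega
      rw [ih _ [] (by simp)]
      have : buf ++ l :: rest = (buf ++ [l]) ++ rest := by simp
      rw [this]
      cases hb : buf ++ [l] with
      | nil => simp at hb
      | cons x t =>
        rw [List.cons_append, chunksRec]
        have hlt : t.length = m := by
          have := congrArg List.length hb; simp at this; omega
        have htk : (t ++ rest).take m = t := by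
          rw [List.take_append_of_le_length (by omega), List.take_of_length_le (by omega)]
        have hdr : (t ++ rest).drop m = rest := by
          rw [List.drop_append_of_le_length (by omega), List.drop_eq_nil_of_le (by omega)]
          simp
        rw [htk, hdr]
        by_cases hch : PySem.Chars.join ['\n'] (x :: t) ≠ []
        · rw [if_pos hch, if_pos hch]; simp
        · rw [if_neg hch, if_neg hch]; simp
    · rw [if_neg hfull]
      have hlt : (buf ++ [l]).length ≤ m := by
        simp at hfull ⊢
        omega
      rw [ih _ (buf ++ [l]) hlt]
      simp

theorem splitOn_go_single (c : Char) : ∀ (fuel : Nat) (l cur : List Char) (acc : List (List Char)),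
    l.length ≤ fuel →
    PySem.Chars.splitOn.go [c] fuel l cur acc =
      acc.reverse ++ (List.splitOn c l).modifyHead (cur.reverse ++ ·) := by
  intro fuel
  induction fuel with
  | zero =>
    intro l cur acc h
    have : l = [] := List.eq_nil_of_length_eq_zero (Nat.le_zero.mp h)
    subst this
    simp [PySem.Chars.splitOn.go, List.splitOn]
  | succ fuel ih =>
    intro l cur acc h
    cases l with
    | nil => simp [PySem.Chars.splitOn.go, List.splitOn]
    | cons a rest =>
      simp only [PySem.Chars.splitOn.go]
      by_cases hac : c = a
      · subst hac
        simp only [List.isPrefixOf, BEq.rfl, Bool.and_eq_true]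
        rw [ih _ _ _ (by simpa using Nat.le_of_succ_le_succ h)]
        simp [List.splitOn, List.splitOnP_cons]
        cases List.splitOnP (fun x => x == c) rest <;> rfl
      · have hpre : [c].isPrefixOf (a :: rest) = false := by
          simp [List.isPrefixOf, hac]
        rw [if_neg (by simp [hpre])]
        rw [ih _ _ _ (by simpa using Nat.le_of_succ_le_succ h)]
        have hne : (List.splitOn c rest) ≠ [] := by
          simp [List.splitOn]
          exact List.splitOnP_ne_nil _ _
        simp only [List.splitOn, List.splitOnP_cons, beq_iff_eq, Ne.symm hac, if_false,
          List.modifyHead_modifyHead]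
        congr 1
        cases hsp : List.splitOnP (fun b => b == c) rest with
        | nil => exact absurd (by simpa [List.splitOn] using hsp) hne
        | cons x t => simp [Function.comp]

theorem chars_splitOn_single (s : List Char) (c : Char) :
    PySem.Chars.splitOn s [c] = List.splitOn c s := by
  rw [PySem.Chars.splitOn, splitOn_go_single c (s.length + 1) s [] [] (by omega)]
  cases h : List.splitOn c s <;> simp

theorem join_splitOn_nl (s : List Char) :
    PySem.Chars.join ['\n'] (PySem.Chars.splitOn s ['\n']) = s := by
  rw [chars_splitOn_single, PySem.Chars.join, List.intercalate_splitOn]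

theorem bneg (n : Int) (hn : n < 0) :
    ∀ (ls : List (List Char)) (acc buf : List (List Char)),
    ls.foldl
      (fun st line =>
        let b := st.2 ++ [line]
        if (b.length : Int) = n then
          let chunk := PySem.Chars.join ['\n'] b
          (if chunk ≠ [] then st.1 ++ [chunk] else st.1, [])
        else (st.1, b)) (acc, buf)
    = (acc, buf ++ ls) := by
  intro ls
  induction ls with
  | nil => intro acc buf; simp
  | cons l rest ih =>
    intro acc buf
    rw [List.foldl_cons, if_neg (by simp; omega)]
    exact (ih acc (buf ++ [l])).trans (by simp)

-- ===== VERDICT (by name: the statement is the Claim_ definition above) =====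
theorem line_based_spec : Claim_equal_line_based := by
  intro text n _ hpre
  unfold Spec_line_based line_based line_based_alt
  simp only []
  rcases lt_or_gt_of_ne hpre with hneg | hpos
  · -- n < 0: A's range is empty, B never flushes mid-loop
    rw [pyRange_neg_nil 0 _ n hneg (by positivity), bneg n hneg]
    simp only [List.foldl_nil, List.nil_append]
    rw [join_splitOn_nl]
    by_cases ht : text.toList ≠ []
    · rw [if_pos ht]
      simp [String.ofList_toList]
    · rw [if_neg ht]
  · -- n > 0: both loops compute chunksRec (n-1)
    obtain ⟨m, hm⟩ : ∃ m : Nat, n = (m : Int) + 1 := ⟨(n - 1).toNat, by omega⟩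
    rw [aloop_eq m n hm _ [], bloop_eq m n hm _ [] [] (by simp)]
    simp
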